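-- pv_equiv track=rewrite | github.com/PureFunctor/offset | offset.py | offset
-- ===== SOURCE A (Python) =====
-- def offset(message: str, direction: str, steps: int) -> str:
--
--     modifier = 1 if direction == "r" else -1
--     new_message = []
--
--     for word in message.split(" "):
--         new_word = []
--
--         for index, char in enumerate(word, start=1):
--
--             if char.isalpha():
--                 lb = 65 if char.isupper() else 97
--                 nc = chr((ord(char) - lb + index * steps * modifier) % 26 + lb)
--                 new_word.append(nc)
--
--             else:
--                 new_word.append(char)
--
--         new_message.append("".join(new_word))
--
--     return " ".join(new_message)
-- ===== SOURCE B (Python) =====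
-- def offset(message: str, direction: str, steps: int) -> str:
--     # Single pass over the message with a position counter that resets on each
--     # space, instead of splitting into words and nesting a per-word loop.
--     modifier = 1 if direction == "r" else -1
--     out = []
--     pos = 0
--     for char in message:
--         if char == " ":
--             out.append(char)
--             pos = 0
--         else:
--             pos += 1
--             if char.isalpha():
--                 base = 65 if char.isupper() else 97
--                 out.append(chr((ord(char) - base + pos * steps * modifier) % 26 + base))
--             else:
--                 out.append(char)
--     return "".join(out)
-- ===== Notes on version B (the rewrite author's own statement) =====
-- stated objective: simpler
-- what changed: Replaces A's split-on-space plus nested per-word enumerate loop and double join with a single pass over the message that keeps a position counter reset at each space.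
import Mathlib
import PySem

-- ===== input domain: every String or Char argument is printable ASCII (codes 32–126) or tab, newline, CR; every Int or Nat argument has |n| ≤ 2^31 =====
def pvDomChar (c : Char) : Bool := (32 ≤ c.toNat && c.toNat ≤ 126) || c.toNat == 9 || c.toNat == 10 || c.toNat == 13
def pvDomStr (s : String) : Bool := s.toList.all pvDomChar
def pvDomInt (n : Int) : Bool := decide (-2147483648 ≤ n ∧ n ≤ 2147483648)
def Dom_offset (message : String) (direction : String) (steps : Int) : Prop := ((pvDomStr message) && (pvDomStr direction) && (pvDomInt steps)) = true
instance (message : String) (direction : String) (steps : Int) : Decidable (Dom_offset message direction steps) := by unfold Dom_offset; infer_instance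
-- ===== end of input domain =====

-- B replaces A's split-into-words + nested per-word loop by a single pass over the
-- message with a position counter that resets at each space (objective: simpler).

-- ===== PORT A =====
-- Literal port of A: split on " ", enumerate each word from 1, shift letters,
-- join words back with " ".  "".join over single chars is the char list itself.
def offset (message : String) (direction : String) (steps : Int) : String :=
  let modifier : Int := if direction = "r" then 1 else -1
  String.ofList (PySem.Chars.join [' ']
    ((PySem.Chars.splitOn message.toList [' ']).foldl (fun nm word =>
      let newWord : List Char :=
        (PySem.List.enumerate word 1).foldl (fun nw ic =>
          if PySem.Chars.isalpha ic.2 then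
            let lb : Int := if PySem.Chars.isupper ic.2 then 65 else 97
            nw ++ [Char.ofNat ((PySem.Int.mod ((ic.2.toNat : Int) - lb + ic.1 * steps * modifier) 26 + lb).toNat)]
          else
            nw ++ [ic.2]) []
      nm ++ [newWord]) []))

-- ===== PORT B =====
-- Literal port of B: one fold over the characters carrying (position, output).
def offset_alt (message : String) (direction : String) (steps : Int) : String :=
  let modifier : Int := if direction = "r" then 1 else -1
  String.ofList
    (message.toList.foldl (fun (st : Int × List Char) c =>
      if c = ' ' then (0, st.2 ++ [c])
      else
        let pos := st.1 + 1
        if PySem.Chars.isalpha c then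
          let base : Int := if PySem.Chars.isupper c then 65 else 97
          (pos, st.2 ++ [Char.ofNat ((PySem.Int.mod ((c.toNat : Int) - base + pos * steps * modifier) 26 + base).toNat)])
        else
          (pos, st.2 ++ [c])) ((0 : Int), ([] : List Char))).2

-- ===== PRECONDITION & SPEC =====
def Spec_offset (message : String) (direction : String) (steps : Int) (out : String) : Prop := out = offset_alt message direction steps
instance (message : String) (direction : String) (steps : Int) (out : String) : Decidable (Spec_offset message direction steps out) := by unfold Spec_offset; infer_instance

-- ===== CLAIM (what is proved, stated in full; the proofs are below) =====
def Claim_equal_offset : Prop := ∀ (message : String) (direction : String) (steps : Int), Dom_offset message direction steps → Spec_offset message direction steps (offset message direction steps)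

-- ===== LEMMAS AND PROOFS =====

-- the per-character letter shift both programs apply at 1-based position p
def gShift (steps modifier p : Int) (c : Char) : Char :=
  if PySem.Chars.isalpha c then
    let lb : Int := if PySem.Chars.isupper c then 65 else 97
    Char.ofNat ((PySem.Int.mod ((c.toNat : Int) - lb + p * steps * modifier) 26 + lb).toNat)
  else c

-- split of a char list on ' ' as a structural recursion
def sp : List Char → List (List Char)
  | [] => [[]]
  | c :: rest =>
    if c = ' ' then [] :: sp rest
    else
      match sp rest with
      | [] => [[c]]
      | w :: ws => (c :: w) :: ws

theorem sp_ne_nil (l : List Char) : sp l ≠ [] := by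
  cases l with
  | nil => simp [sp]
  | cons c rest =>
    simp only [sp]
    split
    · simp
    · split <;> simp

def headCons (pre : List Char) : List (List Char) → List (List Char)
  | [] => [pre]
  | w :: ws => (pre ++ w) :: ws

theorem go_eq (fuel : Nat) : ∀ (l cur : List Char) (acc : List (List Char)), l.length < fuel →
    PySem.Chars.splitOn.go [' '] fuel l cur acc = acc.reverse ++ headCons cur.reverse (sp l) := by
  induction fuel with
  | zero => intro l cur acc h; omega
  | succ n ih =>
    intro l cur acc h
    cases l with
    | nil => rw [PySem.Chars.splitOn.go.eq_def]; simp [sp, headCons]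
    | cons c rest =>
      rw [PySem.Chars.splitOn.go.eq_def]
      by_cases hc : c = ' '
      · subst hc
        simp only [List.isPrefixOf, BEq.rfl, Bool.true_and, if_true,
          List.length_cons, List.drop_succ_cons]
        simp only [List.length_nil, List.drop_zero]
        rw [ih rest [] (cur.reverse :: acc) (by simpa using Nat.lt_of_succ_lt_succ h)]
        simp only [sp, if_true, List.reverse_cons, List.reverse_nil]
        cases hsp : sp rest with
        | nil => exact absurd hsp (sp_ne_nil rest)
        | cons w ws => simp [headCons]
      · have hp : ([' '].isPrefixOf (c :: rest)) = false := by
          simp [List.isPrefixOf]; exact fun h' => hc h'.symm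
        simp only [hp, Bool.false_eq_true, if_false]
        rw [ih rest (c :: cur) acc (by simpa using Nat.lt_of_succ_lt_succ h)]
        simp only [sp, hc, if_false, List.reverse_cons]
        cases hsp : sp rest with
        | nil => exact absurd hsp (sp_ne_nil rest)
        | cons w ws => simp [headCons]

theorem splitOn_eq_sp (l : List Char) : PySem.Chars.splitOn l [' '] = sp l := by
  rw [PySem.Chars.splitOn, go_eq (l.length + 1) l [] [] (Nat.lt_succ_self _)]
  cases hsp : sp l with
  | nil => exact absurd hsp (sp_ne_nil l)
  | cons w ws => simp [headCons]

-- per-word transform, 1-based positions continuing from p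
def procFrom (g : Int → Char → Char) : Int → List Char → List Char
  | _, [] => []
  | p, c :: rest => g (p + 1) c :: procFrom g (p + 1) rest

-- B's single-pass output, position counter p
def bspec (g : Int → Char → Char) : Int → List Char → List Char
  | _, [] => []
  | p, c :: rest =>
    if c = ' ' then ' ' :: bspec g 0 rest
    else g (p + 1) c :: bspec g (p + 1) rest

def tailFlat (g : Int → Char → Char) (ws : List (List Char)) : List Char :=
  ws.flatMap (fun w => ' ' :: procFrom g 0 w)

theorem foldA (f : List Char → Int × Char → List Char) (g : Int → Char → Char)
    (hf : ∀ nw i c, f nw (i, c) = nw ++ [g i c]) :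
    ∀ (word : List Char) (p : Int) (nw : List Char),
      (PySem.List.enumerate word (p + 1)).foldl f nw = nw ++ procFrom g p word := by
  intro word
  induction word with
  | nil => intro p nw; simp [PySem.List.enumerate, procFrom]
  | cons c rest ih =>
    intro p nw
    rw [PySem.List.enumerate_cons, List.foldl_cons, hf, ih (p + 1)]
    simp [procFrom]

theorem foldOuter (pw : List Char → List Char) :
    ∀ (ws : List (List Char)) (nm : List (List Char)),
      ws.foldl (fun nm w => nm ++ [pw w]) nm = nm ++ ws.map pw := by
  intro ws
  induction ws with
  | nil => simp
  | cons w ws ih => intro nm; rw [List.foldl_cons, ih]; simp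

theorem foldB (f : Int × List Char → Char → Int × List Char) (g : Int → Char → Char)
    (hsp : ∀ p acc, f (p, acc) ' ' = (0, acc ++ [' ']))
    (hch : ∀ p acc c, c ≠ ' ' → f (p, acc) c = (p + 1, acc ++ [g (p + 1) c])) :
    ∀ (l : List Char) (p : Int) (acc : List Char),
      (l.foldl f (p, acc)).2 = acc ++ bspec g p l := by
  intro l
  induction l with
  | nil => intro p acc; simp [bspec]
  | cons c rest ih =>
    intro p acc
    by_cases hc : c = ' '
    · subst hc
      rw [List.foldl_cons, hsp, ih 0]
      simp [bspec]
    · rw [List.foldl_cons, hch p acc c hc, ih (p + 1)]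
      simp [bspec, hc]

theorem bspec_eq (g : Int → Char → Char) :
    ∀ (l : List Char) (p : Int),
      bspec g p l = procFrom g p (sp l).head! ++ tailFlat g (sp l).tail := by
  intro l
  induction l with
  | nil => intro p; simp [bspec, sp, procFrom, tailFlat]
  | cons c rest ih =>
    intro p
    by_cases hc : c = ' '
    · subst hc
      simp only [bspec, if_true, sp]
      rw [ih 0]
      cases hsp : sp rest with
      | nil => exact absurd hsp (sp_ne_nil rest)
      | cons w ws => simp [procFrom, tailFlat]
    · simp only [bspec, sp, hc, if_false]
      rw [ih (p + 1)]
      cases hsp : sp rest with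
      | nil => exact absurd hsp (sp_ne_nil rest)
      | cons w ws => simp [procFrom, tailFlat]

theorem join_eq (g : Int → Char → Char) (w : List Char) (ws : List (List Char)) :
    PySem.Chars.join [' '] ((w :: ws).map (fun w => procFrom g 0 w)) =
      procFrom g 0 w ++ tailFlat g ws := by
  induction ws generalizing w with
  | nil => simp [PySem.Chars.join, tailFlat, List.intercalate]
  | cons w' ws ih =>
    simp only [PySem.Chars.join, List.map_cons, List.intercalate, List.intersperse] at ih ⊢
    rw [List.flatten_cons, List.flatten_cons, ih w']
    simp [tailFlat]

-- ===== VERDICT (by name: the statement is the Claim_ definition above) =====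
theorem offset_spec : Claim_equal_offset := by
  intro message direction steps _
  unfold Spec_offset
  simp only [offset, offset_alt]
  set modifier : Int := if direction = "r" then 1 else -1 with hm
  rw [splitOn_eq_sp]
  rw [foldB _ (gShift steps modifier)
        (fun p acc => by simp)
        (fun p acc c hc => by
          simp only [hc, if_false]
          by_cases h : PySem.Chars.isalpha c <;> simp [gShift, h])]
  have hA : ∀ word : List Char,
      (PySem.List.enumerate word 1).foldl (fun nw ic =>
          if PySem.Chars.isalpha ic.2 then
            let lb : Int := if PySem.Chars.isupper ic.2 then 65 else 97
            nw ++ [Char.ofNat ((PySem.Int.mod ((ic.2.toNat : Int) - lb + ic.1 * steps * modifier) 26 + lb).toNat)]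
          else nw ++ [ic.2]) [] = procFrom (gShift steps modifier) 0 word := by
    intro word
    have := foldA (fun nw ic =>
          if PySem.Chars.isalpha ic.2 then
            let lb : Int := if PySem.Chars.isupper ic.2 then 65 else 97
            nw ++ [Char.ofNat ((PySem.Int.mod ((ic.2.toNat : Int) - lb + ic.1 * steps * modifier) 26 + lb).toNat)]
          else nw ++ [ic.2]) (gShift steps modifier)
      (fun nw i c => by by_cases h : PySem.Chars.isalpha c <;> simp [gShift, h]) word 0 []
    simpa using this
  rw [foldOuter]
  simp only [hA]
  cases hsp : sp message.toList with
  | nil => exact absurd hsp (sp_ne_nil _)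
  | cons w ws =>
    simp only [List.nil_append]
    rw [join_eq, bspec_eq (gShift steps modifier) message.toList 0]
    simp [hsp]
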